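-- pv_equiv track=rewrite | github.com/Maxilef/cryptanalyse-cesar-vigenere | syntaxe.py | nb_digrammes
-- ===== SOURCE A (Python) =====
-- def nb_digrammes(chaine) :
--     """
--     compte le nombre d'apparitions d'un bigramme donné dans une chaîne de caractères arbitraire.
--     """
--
--     dico_digrammes = {
--         'ES' : 0,'DE' : 0,'LE' : 0,
--         'EN' : 0,'RE' : 0,'NT' : 0,
--         'ON' : 0,'ER' : 0,'TE' : 0,
--         'EL' : 0,'AN' : 0,'SE' : 0,
--         'ET' : 0,'LA' : 0,'AI' : 0,
--         'IT' : 0,'ME' : 0,'OU' : 0,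
--         'EM' : 0,'IE' : 0
--     }
--
--     for i in range(len(chaine) - 1):
--         bigramme = chaine[i:i+2]
--         if bigramme in dico_digrammes:
--             dico_digrammes[bigramme] += 1
--
--     return dico_digrammes
-- ===== SOURCE B (Python) =====
-- def nb_digrammes(chaine):
--     """
--     compte le nombre d'apparitions d'un bigramme donné dans une chaîne de caractères arbitraire.
--     """
--     bigrammes = [a + b for a, b in zip(chaine, chaine[1:])]
--     return {bg: bigrammes.count(bg) for bg in
--             ['ES', 'DE', 'LE', 'EN', 'RE', 'NT', 'ON', 'ER', 'TE', 'EL',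
--              'AN', 'SE', 'ET', 'LA', 'AI', 'IT', 'ME', 'OU', 'EM', 'IE']}
-- ===== Notes on version B (the rewrite author's own statement) =====
-- stated objective: simpler
-- what changed: B pairs adjacent characters with zip into a bigram list and builds the result as a comprehension over the 20 fixed bigrams using list.count, instead of A's single pass over string positions that membership-tests and mutates a pre-zeroed dict.
import Mathlib
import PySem

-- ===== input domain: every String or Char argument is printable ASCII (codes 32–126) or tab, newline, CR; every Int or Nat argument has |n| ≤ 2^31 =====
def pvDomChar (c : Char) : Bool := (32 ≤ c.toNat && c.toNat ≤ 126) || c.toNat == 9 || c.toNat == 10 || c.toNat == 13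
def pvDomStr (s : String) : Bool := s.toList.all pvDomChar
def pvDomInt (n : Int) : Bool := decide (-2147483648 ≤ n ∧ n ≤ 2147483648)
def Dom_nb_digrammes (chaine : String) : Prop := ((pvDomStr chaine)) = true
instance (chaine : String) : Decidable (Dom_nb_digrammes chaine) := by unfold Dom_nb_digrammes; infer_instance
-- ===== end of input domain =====

-- B replaces A's membership-tested single pass over string positions (mutating a pre-zeroed dict)
-- by a zip-built bigram list counted once per fixed bigram; objective: simpler.

-- ===== PORT A =====
def nb_digrammes (chaine : String) : List (String × Int) :=
  let dico : PySem.Dict String Int := PySem.Dict.ofList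
    [("ES", 0), ("DE", 0), ("LE", 0), ("EN", 0), ("RE", 0), ("NT", 0), ("ON", 0),
     ("ER", 0), ("TE", 0), ("EL", 0), ("AN", 0), ("SE", 0), ("ET", 0), ("LA", 0),
     ("AI", 0), ("IT", 0), ("ME", 0), ("OU", 0), ("EM", 0), ("IE", 0)]
  ((PySem.List.pyRange 0 (PySem.Str.len chaine - 1) 1).foldl
    (fun d i =>
      let bigramme := PySem.Str.slice chaine (some i) (some (i + 2))
      if d.contains bigramme then d.insert bigramme (d.getD bigramme 0 + 1) else d)
    dico).items

-- ===== PORT B =====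
-- zip over the two strings is ported on the code-point lists (exact: Python zips a str by characters)
def nb_digrammes_alt (chaine : String) : List (String × Int) :=
  let bigrammes : List String :=
    (chaine.toList.zip (PySem.Str.slice chaine (some 1) none).toList).map
      (fun p => String.ofList [p.1, p.2])
  ["ES", "DE", "LE", "EN", "RE", "NT", "ON", "ER", "TE", "EL",
   "AN", "SE", "ET", "LA", "AI", "IT", "ME", "OU", "EM", "IE"].map
    (fun bg => (bg, (PySem.List.count bigrammes bg : Int)))

-- ===== PRECONDITION & SPEC =====
def Spec_nb_digrammes (chaine : String) (out : List (String × Int)) : Prop := out = nb_digrammes_alt chaine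
instance (chaine : String) (out : List (String × Int)) : Decidable (Spec_nb_digrammes chaine out) := by unfold Spec_nb_digrammes; infer_instance

-- ===== CLAIM (what is proved, stated in full; the proofs are below) =====
def Claim_equal_nb_digrammes : Prop := ∀ (chaine : String), Dom_nb_digrammes chaine → Spec_nb_digrammes chaine (nb_digrammes chaine)

-- ===== LEMMAS AND PROOFS =====

-- the loop body keeps the key set unchanged
lemma pv_step_keys (d : PySem.Dict String Int) (bg : String) :
    (if d.contains bg then d.insert bg (d.getD bg 0 + 1) else d).keys = d.keys := by
  split_ifs with h
  · exact PySem.Dict.keys_insert_of_contains d _ h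
  · rfl

lemma pv_loop_keys (L : List Int) (f : Int → String) (d : PySem.Dict String Int) :
    (L.foldl (fun d i =>
      if d.contains (f i) then d.insert (f i) (d.getD (f i) 0 + 1) else d) d).keys = d.keys := by
  induction L generalizing d with
  | nil => rfl
  | cons i L ih => rw [List.foldl_cons, ih, pv_step_keys]

lemma pv_loop_getD (L : List Int) (f : Int → String) (d : PySem.Dict String Int) (k : String) :
    (L.foldl (fun d i =>
      if d.contains (f i) then d.insert (f i) (d.getD (f i) 0 + 1) else d) d).getD k 0
    = d.getD k 0 + (if d.contains k then (L.countP (fun i => f i == k) : Int) else 0) := by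
  induction L generalizing d with
  | nil => simp
  | cons i L ih =>
    rw [List.foldl_cons, ih]
    have hck : (if d.contains (f i) then d.insert (f i) (d.getD (f i) 0 + 1) else d).contains k
        = d.contains k := by
      by_cases h : k ∈ d.keys
      · have h' : k ∈ (if d.contains (f i) then d.insert (f i) (d.getD (f i) 0 + 1) else d).keys := by
          rwa [pv_step_keys]
        rw [← PySem.Dict.contains_iff_mem_keys] at h h'
        rw [h, h']
      · have h' : ¬ k ∈ (if d.contains (f i) then d.insert (f i) (d.getD (f i) 0 + 1) else d).keys := by
          rwa [pv_step_keys]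
        rw [← PySem.Dict.contains_iff_mem_keys] at h h'
        simp only [Bool.not_eq_true] at h h'
        rw [h, h']
    rw [hck, List.countP_cons]
    by_cases hc : d.contains (f i) = true
    · simp only [hc, if_true]
      by_cases he : k = f i
      · subst he
        rw [PySem.Dict.getD_insert, if_pos rfl, hc]
        simp only [beq_self_eq_true, if_true]
        push_cast
        ring
      · rw [PySem.Dict.getD_insert, if_neg he]
        have : (f i == k) = false := by
          simp only [beq_eq_false_iff_ne]; exact fun h => he h.symm
        simp [this]
    · simp only [hc, if_false, Bool.false_eq_true]
      by_cases hk : d.contains k = true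
      · have : (f i == k) = false := by
          simp only [beq_eq_false_iff_ne]
          intro h; rw [h] at hc; exact hc hk
        simp [hk, this]
      · simp [hk]

lemma pv_getD_zero (l : List (String × Int)) (h : ∀ p ∈ l, p.2 = 0) (k : String) :
    (PySem.Dict.mk l).getD k 0 = 0 := by
  induction l with
  | nil => rfl
  | cons p t ih =>
    rw [PySem.Dict.getD_eq_get?_getD, PySem.Dict.get?_mk_cons]
    by_cases h1 : (p.1 == k) = true
    · rw [if_pos h1]
      exact h p (by simp)
    · rw [if_neg h1, ← PySem.Dict.getD_eq_get?_getD]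
      exact ih (fun q hq => h q (by simp [hq]))

-- the zip-built bigram list IS the list of two-character windows, indexed
lemma pv_bigrams (cs : List Char) :
    (cs.zip cs.tail).map (fun p => String.ofList [p.1, p.2])
    = (List.range (cs.length - 1)).map (fun j => String.ofList ((cs.drop j).take 2)) := by
  induction cs with
  | nil => rfl
  | cons a t ih =>
    cases t with
    | nil => rfl
    | cons b u =>
      have hlen : (a :: b :: u).length - 1 = u.length + 1 := by simp
      rw [hlen, List.range_succ_eq_map, List.tail_cons, List.zip_cons_cons,
          List.map_cons, List.map_cons, List.map_map]
      refine congrArg₂ _ rfl ?_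
      rw [List.tail_cons] at ih
      rw [ih]
      simp [Function.comp, Nat.succ_eq_add_one, List.drop_succ_cons]

set_option maxHeartbeats 2000000 in
theorem nb_digrammes_eq (chaine : String) : nb_digrammes chaine = nb_digrammes_alt chaine := by
  unfold nb_digrammes nb_digrammes_alt
  set cs := chaine.toList with hcs
  set d0 : PySem.Dict String Int := PySem.Dict.ofList
    [("ES", 0), ("DE", 0), ("LE", 0), ("EN", 0), ("RE", 0), ("NT", 0), ("ON", 0),
     ("ER", 0), ("TE", 0), ("EL", 0), ("AN", 0), ("SE", 0), ("ET", 0), ("LA", 0),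
     ("AI", 0), ("IT", 0), ("ME", 0), ("OU", 0), ("EM", 0), ("IE", 0)] with hd0
  set f : Int → String := fun i => PySem.Str.slice chaine (some i) (some (i + 2)) with hf
  -- the loop, in the shape of the loop lemmas
  show ((PySem.List.pyRange 0 (PySem.Str.len chaine - 1) 1).foldl
      (fun d i => if d.contains (f i) then d.insert (f i) (d.getD (f i) 0 + 1) else d)
      d0).items = _
  have hmk : d0 = PySem.Dict.mk
      [("ES", 0), ("DE", 0), ("LE", 0), ("EN", 0), ("RE", 0), ("NT", 0), ("ON", 0),
       ("ER", 0), ("TE", 0), ("EL", 0), ("AN", 0), ("SE", 0), ("ET", 0), ("LA", 0),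
       ("AI", 0), ("IT", 0), ("ME", 0), ("OU", 0), ("EM", 0), ("IE", 0)] := by rfl
  have hkeysd0 : d0.keys = ["ES", "DE", "LE", "EN", "RE", "NT", "ON", "ER", "TE", "EL",
      "AN", "SE", "ET", "LA", "AI", "IT", "ME", "OU", "EM", "IE"] := by rw [hmk]; rfl
  have hnodup : d0.keys.Nodup := by rw [hkeysd0]; decide
  have hkeys := pv_loop_keys (PySem.List.pyRange 0 (PySem.Str.len chaine - 1) 1) f d0
  have hnodup' : ((PySem.List.pyRange 0 (PySem.Str.len chaine - 1) 1).foldl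
      (fun d i => if d.contains (f i) then d.insert (f i) (d.getD (f i) 0 + 1) else d)
      d0).keys.Nodup := by rw [hkeys]; exact hnodup
  rw [PySem.Dict.items_eq_map_keys _ hnodup' 0, hkeys, hkeysd0]
  apply List.map_congr_left
  intro k hk
  have hcont : d0.contains k = true := by
    rw [PySem.Dict.contains_iff_mem_keys, hkeysd0]; exact hk
  have h0 : d0.getD k 0 = 0 := by
    rw [hmk]
    refine pv_getD_zero _ ?_ k
    intro p hp
    fin_cases hp <;> rfl
  rw [pv_loop_getD, h0, hcont, if_pos rfl, zero_add]
  -- both counts are counts over the list of two-character windows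
  have hbigs : (cs.zip (PySem.Str.slice chaine (some 1) none).toList).map
      (fun p => String.ofList [p.1, p.2])
      = (List.range (cs.length - 1)).map (fun j => String.ofList ((cs.drop j).take 2)) := by
    rw [PySem.Str.toList_slice, PySem.Chars.slice_eq_listSlice, PySem.List.slice_from_one, ← hcs]
    exact pv_bigrams cs
  have hR : PySem.List.pyRange 0 (PySem.Str.len chaine - 1) 1
      = (List.range (cs.length - 1)).map Int.ofNat := by
    rw [PySem.List.pyRange_one]
    have h1 : (PySem.Str.len chaine - 1 - 0).toNat = cs.length - 1 := by
      simp [PySem.Str.len, hcs]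
    rw [h1]
    exact List.map_congr_left (fun j _ => by simp)
  have hfj : ∀ (j : Nat), f ((j : Nat) : Int) = String.ofList ((cs.drop j).take 2) := by
    intro j
    show String.ofList (PySem.Chars.slice chaine.toList (some ((j : Nat) : Int)) (some (((j : Nat) : Int) + 2))) = _
    rw [PySem.Chars.slice_eq_listSlice, ← hcs]
    rw [show ((j : Int) + 2) = ((j : Int) + ((2 : Nat) : Int)) from by norm_num,
        PySem.List.slice_natCast_add]
  rw [hR, List.countP_map]
  have hcount : PySem.List.count
      ((cs.zip (PySem.Str.slice chaine (some 1) none).toList).map (fun p => String.ofList [p.1, p.2])) k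
      = List.countP (fun j => String.ofList ((cs.drop j).take 2) == k) (List.range (cs.length - 1)) := by
    rw [PySem.List.count_eq, hbigs, List.count_eq_countP, List.countP_map]
    rfl
  rw [hcount]
  refine congrArg _ ?_
  refine congrArg _ (List.countP_congr ?_)
  intro j _
  simp [Function.comp, Int.ofNat_eq_natCast, hfj j]
-- ===== VERDICT (by name: the statement is the Claim_ definition above) =====
theorem nb_digrammes_spec : Claim_equal_nb_digrammes := by
  intro chaine _
  unfold Spec_nb_digrammes
  exact nb_digrammes_eq chaine
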